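-- pv_equiv track=rewrite | github.com/ABDYEGIT/sap-sql-agent | sql_agent/metadata_loader.py | _expand_tables_via_relationships
-- ===== SOURCE A (Python) =====
-- def _expand_tables_via_relationships(matched_tables: set, graph: dict, max_hops: int = 2) -> set:
--     """Eslesen tablolardan max_hops mesafedeki tablolari da ekler."""
--     expanded = set(matched_tables)
--     frontier = set(matched_tables)
--     for _ in range(max_hops):
--         next_frontier = set()
--         for table in frontier:
--             for neighbor in graph.get(table, set()):
--                 if neighbor not in expanded:
--                     expanded.add(neighbor)
--                     next_frontier.add(neighbor)
--         frontier = next_frontier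
--     return expanded
-- ===== SOURCE B (Python) =====
-- def _expand_tables_via_relationships(matched_tables: set, graph: dict, max_hops: int = 2) -> set:
--     """Single-queue BFS with per-node depth labels instead of wave-by-wave frontier sets."""
--     expanded = set(matched_tables)
--     queue = [(t, 0) for t in expanded]
--     i = 0
--     while i < len(queue):
--         node, depth = queue[i]
--         i += 1
--         if depth < max_hops:
--             for neighbor in graph.get(node, set()):
--                 if neighbor not in expanded:
--                     expanded.add(neighbor)
--                     queue.append((neighbor, depth + 1))
--     return expanded
-- ===== Notes on version B (the rewrite author's own statement) =====
-- stated objective: alternative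
-- what changed: Replaces the wave-by-wave nested hop/frontier/neighbor loops (rebuilding a frontier set per hop) with a single depth-labeled BFS queue scanned once by a head index.
import Mathlib
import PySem

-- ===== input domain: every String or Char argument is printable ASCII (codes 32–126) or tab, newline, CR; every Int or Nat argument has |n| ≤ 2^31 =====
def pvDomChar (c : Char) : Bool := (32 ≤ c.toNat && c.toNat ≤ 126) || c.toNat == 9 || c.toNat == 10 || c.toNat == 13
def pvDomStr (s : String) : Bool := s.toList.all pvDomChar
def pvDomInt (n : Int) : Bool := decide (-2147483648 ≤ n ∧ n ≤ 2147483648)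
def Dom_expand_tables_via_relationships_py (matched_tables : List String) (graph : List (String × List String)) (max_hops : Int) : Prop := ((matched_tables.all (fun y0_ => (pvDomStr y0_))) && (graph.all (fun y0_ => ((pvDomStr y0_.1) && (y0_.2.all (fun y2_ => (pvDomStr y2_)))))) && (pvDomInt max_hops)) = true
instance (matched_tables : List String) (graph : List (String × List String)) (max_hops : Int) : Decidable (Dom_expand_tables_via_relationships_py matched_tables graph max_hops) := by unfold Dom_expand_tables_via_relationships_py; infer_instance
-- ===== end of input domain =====

-- B replaces A's wave-by-wave frontier expansion with a single depth-labeled BFS queue (alternative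
-- decomposition, same asymptotic cost). Equivalence is on the returned set (sets are insertion-order lists here).

-- ===== PORT A =====
-- shared dict primitive: graph.get(key, set()) on the association list (first match, per the type convention)
def pvGet (graph : List (String × List String)) (k : String) : List String :=
  match graph with
  | [] => []
  | (k', v) :: rest => if k' == k then v else pvGet rest k

-- literal transliteration of A: expanded/frontier sets, 'for _ in range(max_hops)' over waves,
-- inner loops over frontier and graph.get(table, set()).
def expand_tables_via_relationships_py (matched_tables : List String) (graph : List (String × List String)) (max_hops : Int) : List String :=
  let expanded : PySem.Set String := PySem.Set.ofList matched_tables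
  let frontier : PySem.Set String := PySem.Set.ofList matched_tables
  let res := (PySem.List.pyRange 0 max_hops 1).foldl
    (fun (st : PySem.Set String × PySem.Set String) _ =>
      st.2.foldl
        (fun (st2 : PySem.Set String × PySem.Set String) table =>
          (pvGet graph table).foldl
            (fun (st3 : PySem.Set String × PySem.Set String) neighbor =>
              if PySem.Set.contains st3.1 neighbor then st3
              else (PySem.Set.add st3.1 neighbor, PySem.Set.add st3.2 neighbor))
            st2)
        (st.1, PySem.Set.empty))
    (expanded, frontier)
  res.1

-- ===== PORT B =====
-- B's queue loop; the fuel argument is only a totality guard (each step pops one queue entry);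
-- the fuel chosen in expand_tables_via_relationships_py_alt is proved sufficient below.
def pvBfs (graph : List (String × List String)) (max_hops : Int) : Nat → List (String × Int) → PySem.Set String → PySem.Set String
  | 0, _, expanded => expanded
  | _ + 1, [], expanded => expanded
  | fuel + 1, (node, depth) :: rest, expanded =>
    if depth < max_hops then
      let st := (pvGet graph node).foldl
        (fun (st : PySem.Set String × List (String × Int)) neighbor =>
          if PySem.Set.contains st.1 neighbor then st
          else (PySem.Set.add st.1 neighbor, st.2 ++ [(neighbor, depth + 1)]))
        (expanded, rest)
      pvBfs graph max_hops fuel st.2 st.1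
    else pvBfs graph max_hops fuel rest expanded

def expand_tables_via_relationships_py_alt (matched_tables : List String) (graph : List (String × List String)) (max_hops : Int) : List String :=
  let expanded : PySem.Set String := PySem.Set.ofList matched_tables
  let queue : List (String × Int) := expanded.map (fun t => (t, 0))
  pvBfs graph max_hops (matched_tables.length + (graph.map (fun p => p.2.length)).sum) queue expanded

-- ===== PRECONDITION & SPEC =====
def Spec_expand_tables_via_relationships_py (matched_tables : List String) (graph : List (String × List String)) (max_hops : Int) (out : List String) : Prop := out = expand_tables_via_relationships_py_alt matched_tables graph max_hops
instance (matched_tables : List String) (graph : List (String × List String)) (max_hops : Int) (out : List String) : Decidable (Spec_expand_tables_via_relationships_py matched_tables graph max_hops out) := by unfold Spec_expand_tables_via_relationships_py; infer_instance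

-- ===== CLAIM (what is proved, stated in full; the proofs are below) =====
def Claim_equal_expand_tables_via_relationships_py : Prop := ∀ (matched_tables : List String) (graph : List (String × List String)) (max_hops : Int), Dom_expand_tables_via_relationships_py matched_tables graph max_hops → Spec_expand_tables_via_relationships_py matched_tables graph max_hops (expand_tables_via_relationships_py matched_tables graph max_hops)

-- ===== LEMMAS AND PROOFS =====

-- the sublist of `adj` that is fresh w.r.t. the set E (order preserved, duplicates dropped)
def pvFresh (E : List String) : List String → List String
  | [] => []
  | nb :: t => if nb ∈ E then pvFresh E t else nb :: pvFresh (E ++ [nb]) t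

-- one wave: thread the expanded set through the frontier, collecting the fresh neighbors
def pvWave (graph : List (String × List String)) : List String → List String → (List String × List String)
  | [], E => (E, [])
  | t :: T, E =>
    let c := pvFresh E (pvGet graph t)
    let r := pvWave graph T (E ++ c)
    (r.1, c ++ r.2)

-- A's outer loop as recursion on the wave count, state = (expanded, frontier)
def pvLv (graph : List (String × List String)) : Nat → (List String × List String) → (List String × List String)
  | 0, st => st
  | k + 1, st => pvLv graph k (pvWave graph st.2 st.1)

-- exact number of queue pops B performs, per wave
def pvNeed (graph : List (String × List String)) : Nat → List String → List String → Nat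
  | 0, F, _ => F.length
  | k + 1, F, E => F.length + pvNeed graph k (pvWave graph F E).2 (pvWave graph F E).1

theorem pvFresh_mem {E adj : List String} {x : String} (h : x ∈ pvFresh E adj) : x ∈ adj ∧ x ∉ E := by
  induction adj generalizing E with
  | nil => simp [pvFresh] at h
  | cons nb t ih =>
    simp only [pvFresh] at h
    split at h
    · rcases ih h with ⟨h1, h2⟩; exact ⟨by simp [h1], h2⟩
    · rename_i hc
      rcases List.mem_cons.mp h with h | h
      · subst h; exact ⟨by simp, hc⟩
      · rcases ih h with ⟨h1, h2⟩
        exact ⟨by simp [h1], fun hx => h2 (by simp [hx])⟩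

theorem pvFresh_nodup (E adj : List String) : (pvFresh E adj).Nodup := by
  induction adj generalizing E with
  | nil => simp [pvFresh]
  | cons nb t ih =>
    simp only [pvFresh]
    split
    · exact ih E
    · refine List.nodup_cons.mpr ⟨fun h => ?_, ih (E ++ [nb])⟩
      exact (pvFresh_mem h).2 (by simp)

-- B's inner neighbor scan, characterized by pvFresh
theorem pvScanB (d : Int) (adj : List String) :
    ∀ (E : List String) (q : List (String × Int)),
    adj.foldl
      (fun (st : PySem.Set String × List (String × Int)) neighbor =>
        if PySem.Set.contains st.1 neighbor then st
        else (PySem.Set.add st.1 neighbor, st.2 ++ [(neighbor, d)]))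
      (E, q)
    = (E ++ pvFresh E adj, q ++ (pvFresh E adj).map (fun x => (x, d))) := by
  induction adj with
  | nil => intro E q; simp [pvFresh]
  | cons nb t ih =>
    intro E q
    simp only [List.foldl_cons, pvFresh]
    by_cases hc : nb ∈ E
    · have hx : PySem.Set.contains E nb = true := by
        simp [PySem.Set.contains, List.contains_eq_mem, hc]
      rw [if_pos hx, if_pos hc, ih E q]
    · have hx : ¬ (PySem.Set.contains E nb = true) := by
        simp [PySem.Set.contains, List.contains_eq_mem, hc]
      rw [if_neg hx, if_neg hc, PySem.Set.add, if_neg hx, ih (E ++ [nb]) (q ++ [(nb, d)])]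
      simp

-- A's inner neighbor scan, characterized by pvFresh (nf ⊆ E keeps next_frontier additions plain appends)
theorem pvScanA (adj : List String) :
    ∀ (E nf : List String), (∀ x ∈ nf, x ∈ E) →
    adj.foldl
      (fun (st3 : PySem.Set String × PySem.Set String) neighbor =>
        if PySem.Set.contains st3.1 neighbor then st3
        else (PySem.Set.add st3.1 neighbor, PySem.Set.add st3.2 neighbor))
      (E, nf)
    = (E ++ pvFresh E adj, nf ++ pvFresh E adj) := by
  induction adj with
  | nil => intro E nf _; simp [pvFresh]
  | cons nb t ih =>
    intro E nf hsub
    simp only [List.foldl_cons, pvFresh]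
    by_cases hc : nb ∈ E
    · have hx : PySem.Set.contains E nb = true := by
        simp [PySem.Set.contains, List.contains_eq_mem, hc]
      rw [if_pos hx, if_pos hc, ih E nf hsub]
    · have hnf : nb ∉ nf := fun hx => hc (hsub nb hx)
      have hx : ¬ (PySem.Set.contains E nb = true) := by
        simp [PySem.Set.contains, List.contains_eq_mem, hc]
      have hxf : ¬ (PySem.Set.contains nf nb = true) := by
        simp [PySem.Set.contains, List.contains_eq_mem, hnf]
      rw [if_neg hx, if_neg hc, PySem.Set.add, if_neg hx, PySem.Set.add, if_neg hxf]
      rw [ih (E ++ [nb]) (nf ++ [nb])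
        (by intro x hx; rcases List.mem_append.mp hx with hx | hx
            · exact List.mem_append.mpr (Or.inl (hsub x hx))
            · exact List.mem_append.mpr (Or.inr hx))]
      simp

-- A's frontier loop is pvWave
theorem pvFrontierA (graph : List (String × List String)) :
    ∀ (F E nf : List String), (∀ x ∈ nf, x ∈ E) →
    F.foldl
      (fun (st2 : PySem.Set String × PySem.Set String) table =>
        (pvGet graph table).foldl
          (fun (st3 : PySem.Set String × PySem.Set String) neighbor =>
            if PySem.Set.contains st3.1 neighbor then st3
            else (PySem.Set.add st3.1 neighbor, PySem.Set.add st3.2 neighbor))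
          st2)
      (E, nf)
    = ((pvWave graph F E).1, nf ++ (pvWave graph F E).2) := by
  intro F
  induction F with
  | nil => intro E nf _; simp [pvWave]
  | cons t T ih =>
    intro E nf hsub
    simp only [List.foldl_cons, pvWave]
    rw [pvScanA _ E nf hsub]
    rw [ih (E ++ pvFresh E (pvGet graph t)) (nf ++ pvFresh E (pvGet graph t))
      (by intro x hx; rcases List.mem_append.mp hx with hx | hx
          · exact List.mem_append.mpr (Or.inl (hsub x hx))
          · exact List.mem_append.mpr (Or.inr hx))]
    simp

-- A's hop loop is pvLv (the body ignores the range element)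
theorem pvHopsA (graph : List (String × List String)) (l : List Int) :
    ∀ (st : PySem.Set String × PySem.Set String),
    l.foldl
      (fun (st : PySem.Set String × PySem.Set String) _ =>
        st.2.foldl
          (fun (st2 : PySem.Set String × PySem.Set String) table =>
            (pvGet graph table).foldl
              (fun (st3 : PySem.Set String × PySem.Set String) neighbor =>
                if PySem.Set.contains st3.1 neighbor then st3
                else (PySem.Set.add st3.1 neighbor, PySem.Set.add st3.2 neighbor))
              st2)
          (st.1, PySem.Set.empty))
      st
    = pvLv graph l.length st := by
  induction l with
  | nil => intro st; simp [pvLv]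
  | cons a l ih =>
    intro st
    simp only [List.foldl_cons, List.length_cons]
    rw [pvFrontierA graph st.2 st.1 PySem.Set.empty (by intro x hx; simp [PySem.Set.empty] at hx)]
    rw [ih]
    simp only [pvLv, PySem.Set.empty, List.nil_append]

theorem pvWave_fst (graph : List (String × List String)) :
    ∀ (F E : List String), (pvWave graph F E).1 = E ++ (pvWave graph F E).2 := by
  intro F
  induction F with
  | nil => intro E; simp [pvWave]
  | cons t T ih => intro E; simp [pvWave, ih]

theorem pvGet_sub (t : String) (x : String) :
    ∀ (g : List (String × List String)), x ∈ pvGet g t → x ∈ g.flatMap (fun p => p.2) := by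
  intro g
  induction g with
  | nil => simp [pvGet]
  | cons p g ihg =>
    obtain ⟨k, v⟩ := p
    simp only [pvGet, List.flatMap_cons, List.mem_append]
    by_cases hk : k == t
    · rw [if_pos hk]; exact fun h => Or.inl h
    · rw [if_neg hk]; exact fun h => Or.inr (ihg h)

theorem pvWave_mem (graph : List (String × List String)) :
    ∀ (F E : List String) (x : String), x ∈ (pvWave graph F E).2 →
      x ∈ graph.flatMap (fun p => p.2) ∧ x ∉ E := by
  intro F
  induction F with
  | nil => intro E x hx; simp [pvWave] at hx
  | cons t T ih =>
    intro E x hx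
    simp only [pvWave, List.mem_append] at hx
    rcases hx with hx | hx
    · rcases pvFresh_mem hx with ⟨h1, h2⟩
      exact ⟨pvGet_sub t x graph h1, h2⟩
    · rcases ih (E ++ pvFresh E (pvGet graph t)) x hx with ⟨h1, h2⟩
      exact ⟨h1, fun hxE => h2 (by simp [hxE])⟩

theorem pvWave_nodup (graph : List (String × List String)) :
    ∀ (F E : List String), (pvWave graph F E).2.Nodup := by
  intro F
  induction F with
  | nil => intro E; simp [pvWave]
  | cons t T ih =>
    intro E
    simp only [pvWave]
    refine List.Nodup.append (pvFresh_nodup _ _) (ih _) ?_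
    intro x hx hx'
    exact (pvWave_mem graph T _ x hx').2 (by simp [hx])

-- pvBfs ignores positive leftover fuel on an empty queue
theorem pvBfs_nil (graph : List (String × List String)) (m : Int) (fuel : Nat) (E : PySem.Set String) :
    pvBfs graph m fuel [] E = E := by
  cases fuel <;> simp [pvBfs]

-- draining entries at depth ≥ max_hops
theorem pvBfs_drain (graph : List (String × List String)) (m : Int) :
    ∀ (q : List (String × Int)) (fuel : Nat) (E : PySem.Set String),
    (∀ p ∈ q, ¬ p.2 < m) → pvBfs graph m (q.length + fuel) q E = E := by
  intro q
  induction q with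
  | nil => intro fuel E _; simpa using pvBfs_nil graph m fuel E
  | cons p rest ih =>
    intro fuel E h
    obtain ⟨n, d⟩ := p
    have hd : ¬ d < m := h (n, d) (by simp)
    have hlen : ((n, d) :: rest).length + fuel = rest.length + fuel + 1 := by
      simp [List.length_cons]; omega
    rw [hlen]
    simp only [pvBfs, if_neg hd]
    exact ih fuel E (fun p hp => h p (by simp [hp]))

-- popping one wave: the queue holds level-d nodes L then level-(d+1) nodes M; after |L| pops the
-- queue holds M followed by the wave's fresh nodes, and expanded has absorbed the wave
theorem pvBfs_level (graph : List (String × List String)) (m : Int) (d : Int) (hd : d < m) :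
    ∀ (L : List String) (fuel : Nat) (M : List String) (E : PySem.Set String),
    pvBfs graph m (L.length + fuel) (L.map (fun x => (x, d)) ++ M.map (fun x => (x, d + 1))) E
    = pvBfs graph m fuel ((M ++ (pvWave graph L E).2).map (fun x => (x, d + 1))) (pvWave graph L E).1 := by
  intro L
  induction L with
  | nil => intro fuel M E; simp [pvWave]
  | cons t T ih =>
    intro fuel M E
    have hlen : ((t :: T) : List String).length + fuel = T.length + fuel + 1 := by
      simp [List.length_cons]; omega
    rw [hlen]
    simp only [List.map_cons, List.cons_append, pvBfs, if_pos hd]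
    rw [pvScanB (d + 1) (pvGet graph t) E (T.map (fun x => (x, d)) ++ M.map (fun x => (x, d + 1)))]
    have hq : (T.map (fun x => (x, d)) ++ M.map (fun x => (x, d + 1)))
          ++ (pvFresh E (pvGet graph t)).map (fun x => (x, d + 1))
        = T.map (fun x => (x, d)) ++ (M ++ pvFresh E (pvGet graph t)).map (fun x => (x, d + 1)) := by
      simp
    rw [hq, ih fuel (M ++ pvFresh E (pvGet graph t)) (E ++ pvFresh E (pvGet graph t))]
    simp [pvWave]

-- the main correspondence: B's queue run with (exact + slack) fuel computes A's wave recursion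
theorem pvBfs_lv (graph : List (String × List String)) (m : Int) :
    ∀ (k : Nat) (d : Int), m = d + k →
    ∀ (F : List String) (E : PySem.Set String) (extra : Nat),
    pvBfs graph m (pvNeed graph k F E + extra) (F.map (fun x => (x, d))) E = (pvLv graph k (E, F)).1 := by
  intro k
  induction k with
  | zero =>
    intro d hm F E extra
    simp only [pvNeed, pvLv]
    have h := pvBfs_drain graph m (F.map (fun x => (x, d))) extra E
      (by intro p hp; simp only [List.mem_map] at hp; rcases hp with ⟨x, _, rfl⟩; omega)
    rwa [List.length_map] at h
  | succ n ih =>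
    intro d hm F E extra
    have hd : d < m := by omega
    simp only [pvNeed]
    rw [Nat.add_assoc]
    have h := pvBfs_level graph m d hd F (pvNeed graph n (pvWave graph F E).2 (pvWave graph F E).1 + extra) [] E
    simp only [List.map_nil, List.append_nil, List.nil_append] at h
    rw [h, ih (d + 1) (by omega) (pvWave graph F E).2 (pvWave graph F E).1 extra]
    simp [pvLv]

-- fuel bound: the exact pop count is at most |F| plus the fresh capacity left in the graph's values
theorem pvNeed_le (graph : List (String × List String)) :
    ∀ (k : Nat) (F E : List String),
    pvNeed graph k F E ≤ F.length + ((graph.flatMap (fun p => p.2)).toFinset \ E.toFinset).card := by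
  intro k
  induction k with
  | zero => intro F E; simp [pvNeed]
  | succ n ih =>
    intro F E
    simp only [pvNeed]
    have h := ih (pvWave graph F E).2 (pvWave graph F E).1
    have hsub : (pvWave graph F E).2.toFinset ⊆
        (graph.flatMap (fun p => p.2)).toFinset \ E.toFinset := by
      intro x hx
      simp only [List.mem_toFinset] at hx
      rcases pvWave_mem graph F E x hx with ⟨h1, h2⟩
      simp only [Finset.mem_sdiff, List.mem_toFinset]
      exact ⟨h1, h2⟩
    have hlen : (pvWave graph F E).2.length ≤ ((graph.flatMap (fun p => p.2)).toFinset \ E.toFinset).card := by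
      have := Finset.card_le_card hsub
      rwa [List.toFinset_card_of_nodup (pvWave_nodup graph F E)] at this
    have hcard : ((graph.flatMap (fun p => p.2)).toFinset \ (pvWave graph F E).1.toFinset).card
        ≤ ((graph.flatMap (fun p => p.2)).toFinset \ E.toFinset).card - (pvWave graph F E).2.length := by
      have h1 : (graph.flatMap (fun p => p.2)).toFinset \ (pvWave graph F E).1.toFinset
          ⊆ ((graph.flatMap (fun p => p.2)).toFinset \ E.toFinset) \ (pvWave graph F E).2.toFinset := by
        intro x hx
        simp only [Finset.mem_sdiff, List.mem_toFinset, pvWave_fst graph F E, List.mem_append] at hx ⊢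
        push Not at hx
        exact ⟨⟨hx.1, hx.2.1⟩, hx.2.2⟩
      calc ((graph.flatMap (fun p => p.2)).toFinset \ (pvWave graph F E).1.toFinset).card
          ≤ (((graph.flatMap (fun p => p.2)).toFinset \ E.toFinset) \ (pvWave graph F E).2.toFinset).card :=
            Finset.card_le_card h1
        _ = ((graph.flatMap (fun p => p.2)).toFinset \ E.toFinset).card
            - ((pvWave graph F E).2.toFinset ∩ ((graph.flatMap (fun p => p.2)).toFinset \ E.toFinset)).card :=
            Finset.card_sdiff
        _ = ((graph.flatMap (fun p => p.2)).toFinset \ E.toFinset).card - (pvWave graph F E).2.toFinset.card := by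
            rw [Finset.inter_eq_left.mpr hsub]
        _ = ((graph.flatMap (fun p => p.2)).toFinset \ E.toFinset).card - (pvWave graph F E).2.length := by
            rw [List.toFinset_card_of_nodup (pvWave_nodup graph F E)]
    omega

theorem pvOfList_length_le (l : List String) : (PySem.Set.ofList l).length ≤ l.length := by
  rw [PySem.Set.ofList_eq_foldl]
  have h : ∀ (l s : List String), (l.foldl PySem.Set.add s).length ≤ s.length + l.length := by
    intro l
    induction l with
    | nil => simp
    | cons x t ih =>
      intro s
      refine le_trans (ih (PySem.Set.add s x)) ?_
      have hadd : (PySem.Set.add s x).length ≤ s.length + 1 := by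
        simp only [PySem.Set.add]; split
        · omega
        · simp
      simp only [List.length_cons]
      omega
  simpa using h l []

-- ===== VERDICT (by name: the statement is the Claim_ definition above) =====
theorem expand_tables_via_relationships_py_spec : Claim_equal_expand_tables_via_relationships_py := by
  intro matched_tables graph max_hops _
  unfold Spec_expand_tables_via_relationships_py
  show expand_tables_via_relationships_py matched_tables graph max_hops
      = expand_tables_via_relationships_py_alt matched_tables graph max_hops
  simp only [expand_tables_via_relationships_py, expand_tables_via_relationships_py_alt]
  rw [pvHopsA graph (PySem.List.pyRange 0 max_hops 1) (PySem.Set.ofList matched_tables, PySem.Set.ofList matched_tables)]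
  rw [PySem.List.length_pyRange_one]
  have hbound : pvNeed graph (max_hops - 0).toNat (PySem.Set.ofList matched_tables) (PySem.Set.ofList matched_tables)
      ≤ matched_tables.length + (graph.map (fun p => p.2.length)).sum := by
    refine le_trans (pvNeed_le graph _ _ _) ?_
    have h1 : (PySem.Set.ofList matched_tables : List String).length ≤ matched_tables.length :=
      pvOfList_length_le matched_tables
    have h2 : ((graph.flatMap (fun p => p.2)).toFinset \ (PySem.Set.ofList matched_tables : List String).toFinset).card
        ≤ (graph.map (fun p => p.2.length)).sum := by
      calc ((graph.flatMap (fun p => p.2)).toFinset \ (PySem.Set.ofList matched_tables : List String).toFinset).card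
          ≤ (graph.flatMap (fun p => p.2)).toFinset.card := Finset.card_le_card Finset.sdiff_subset
        _ ≤ (graph.flatMap (fun p => p.2)).length := List.toFinset_card_le _
        _ = (graph.map (fun p => p.2.length)).sum := by simp [List.length_flatMap]
    omega
  by_cases hpos : 0 ≤ max_hops
  · obtain ⟨extra, hextra⟩ := Nat.le.dest hbound
    have hm : max_hops = (0 : Int) + ((max_hops - 0).toNat : Int) := by omega
    rw [← hextra,
      pvBfs_lv graph max_hops (max_hops - 0).toNat 0 hm (PySem.Set.ofList matched_tables)
        (PySem.Set.ofList matched_tables) extra]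
  · have hneg : max_hops < 0 := by omega
    have h0 : (max_hops - 0).toNat = 0 := by omega
    rw [h0]
    simp only [pvLv]
    have hq : ((PySem.Set.ofList matched_tables : List String).map (fun t => ((t : String), (0 : Int)))).length
        ≤ matched_tables.length + (graph.map (fun p => p.2.length)).sum := by
      simpa using le_trans (pvOfList_length_le matched_tables) (Nat.le_add_right _ _)
    obtain ⟨ex2, hex2⟩ := Nat.le.dest hq
    rw [← hex2,
      pvBfs_drain graph max_hops _ ex2 (PySem.Set.ofList matched_tables)
        (by intro p hp; simp only [List.mem_map] at hp; rcases hp with ⟨x, _, rfl⟩; omega)]
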